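-- pv_equiv track=rewrite | github.com/sanchveda/Convoluion-RNN-Depression-Analysis-Conversations | CRNN/prepare_list.py | does_exist
-- ===== SOURCE A (Python) =====
-- def does_exist(name,name_list,length_list):
--
-- 	flag=0
-- 	length=0
-- 	for i in range(len(name_list)):
--
-- 		elements=name_list[i]
--
-- 		if name == elements:
-- 			flag=flag+1
-- 			length=length_list[i]
-- 	if flag:
-- 		#print ("flag", flag, "Name", name)
-- 		#input ('')
-- 		return length
--
-- 	else:
-- 		return 0
-- ===== SOURCE B (Python) =====
-- def does_exist(name, name_list, length_list):
--     for i in reversed(range(len(name_list))):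
--         if name == name_list[i]:
--             return length_list[i]
--     return 0
-- ===== Notes on version B (the rewrite author's own statement) =====
-- stated objective: simpler
-- what changed: Replaces the forward scan that counts matches and keeps overwriting the stored length with a reverse index scan that returns the first (i.e. last) match immediately, dropping the flag counter and the final branch.
import Mathlib
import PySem

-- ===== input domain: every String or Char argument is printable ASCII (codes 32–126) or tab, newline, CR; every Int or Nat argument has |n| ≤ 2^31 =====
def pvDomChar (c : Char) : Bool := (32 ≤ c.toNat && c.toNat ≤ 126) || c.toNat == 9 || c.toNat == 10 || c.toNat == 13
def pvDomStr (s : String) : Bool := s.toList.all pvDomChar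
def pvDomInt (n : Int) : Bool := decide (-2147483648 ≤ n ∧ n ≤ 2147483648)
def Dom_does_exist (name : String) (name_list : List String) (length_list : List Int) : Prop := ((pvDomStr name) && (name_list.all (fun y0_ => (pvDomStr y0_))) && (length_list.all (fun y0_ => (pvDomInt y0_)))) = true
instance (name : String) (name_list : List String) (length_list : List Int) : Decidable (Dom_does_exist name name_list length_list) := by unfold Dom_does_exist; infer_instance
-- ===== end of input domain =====

-- B replaces A's count-and-overwrite forward scan by a reverse scan returning at the first (= last) match: simpler control flow, same values.

-- ===== PORT A =====
def does_exist (name : String) (name_list : List String) (length_list : List Int) : Int :=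
  let st := (PySem.List.pyRange 0 (name_list.length : Int) 1).foldl
    (fun (st : Int × Int) i =>
      let elements := PySem.List.pyGetD name_list i ""
      if name == elements then (st.1 + 1, PySem.List.pyGetD length_list i 0) else st)
    (0, 0)
  if st.1 ≠ 0 then st.2 else 0

-- ===== PORT B =====
-- reverse scan: first match from the back, early return; index k runs len-1, …, 0
def does_exist_alt_go (name : String) (name_list : List String) (length_list : List Int) : Nat → Int
  | 0 => 0
  | k + 1 =>
    if name == name_list.getD k "" then PySem.List.pyGetD length_list (k : Int) 0
    else does_exist_alt_go name name_list length_list k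

def does_exist_alt (name : String) (name_list : List String) (length_list : List Int) : Int :=
  does_exist_alt_go name name_list length_list name_list.length

-- ===== PRECONDITION & SPEC =====
-- Pre_ excludes exactly the inputs where Python A raises IndexError: some matching index has no entry in length_list (B raises there too).
def Pre_does_exist (name : String) (name_list : List String) (length_list : List Int) : Prop :=
  ∀ i : Nat, i < name_list.length → name_list.getD i "" = name → i < length_list.length
instance (name : String) (name_list : List String) (length_list : List Int) : Decidable (Pre_does_exist name name_list length_list) := by unfold Pre_does_exist; infer_instance
def pvWitness_does_exist : String × List String × List Int := ("a", ["b", "a"], [3, 7])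

def Spec_does_exist (name : String) (name_list : List String) (length_list : List Int) (out : Int) : Prop := out = does_exist_alt name name_list length_list
instance (name : String) (name_list : List String) (length_list : List Int) (out : Int) : Decidable (Spec_does_exist name name_list length_list out) := by unfold Spec_does_exist; infer_instance

-- ===== CLAIM (what is proved, stated in full; the proofs are below) =====
def Claim_equal_does_exist : Prop := ∀ (name : String) (name_list : List String) (length_list : List Int), Dom_does_exist name name_list length_list → Pre_does_exist name name_list length_list → Spec_does_exist name name_list length_list (does_exist name name_list length_list)

-- ===== LEMMAS AND PROOFS =====

-- A's loop state after the first n indices, over the cast-free range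
def stA (name : String) (name_list : List String) (length_list : List Int) (n : Nat) : Int × Int :=
  (List.range n).foldl
    (fun (st : Int × Int) k =>
      if name == name_list.getD k "" then (st.1 + 1, PySem.List.pyGetD length_list (k : Int) 0) else st)
    (0, 0)

theorem stA_succ (name : String) (name_list : List String) (length_list : List Int) (n : Nat) :
    stA name name_list length_list (n + 1) =
      (fun (st : Int × Int) k =>
        if name == name_list.getD k "" then (st.1 + 1, PySem.List.pyGetD length_list (k : Int) 0) else st)
        (stA name name_list length_list n) n := by
  simp [stA, List.range_succ]

theorem stA_inv (name : String) (name_list : List String) (length_list : List Int) (n : Nat) :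
    0 ≤ (stA name name_list length_list n).1 ∧
    (if (stA name name_list length_list n).1 ≠ 0 then (stA name name_list length_list n).2 else 0)
      = does_exist_alt_go name name_list length_list n := by
  induction n with
  | zero => simp [stA, does_exist_alt_go]
  | succ n ih =>
    rw [stA_succ]
    by_cases h : name == name_list.getD n ""
    · simp only [h, if_pos, does_exist_alt_go]
      constructor
      · exact le_trans ih.1 (by omega)
      · have : (stA name name_list length_list n).1 + 1 ≠ 0 := by omega
        simp [this]
    · simp only [h, does_exist_alt_go]
      simpa [h] using ih

theorem does_exist_eq_stA (name : String) (name_list : List String) (length_list : List Int) :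
    does_exist name name_list length_list =
      (if (stA name name_list length_list name_list.length).1 ≠ 0
       then (stA name name_list length_list name_list.length).2 else 0) := by
  unfold does_exist stA
  rw [PySem.List.pyRange_one 0 (name_list.length : Int)]
  simp [List.foldl_map]

-- ===== VERDICT (by name: the statement is the Claim_ definition above) =====
theorem does_exist_spec : Claim_equal_does_exist := by
  intro name name_list length_list _ _
  unfold Spec_does_exist does_exist_alt
  rw [does_exist_eq_stA]
  exact (stA_inv name name_list length_list name_list.length).2
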